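-- pv_equiv track=rewrite | github.com/JOAO-LEE/portfolio-trybe-exercicios | ciencia-da-computacao/introducao-a-python/dia-1-aprendendo-python/exercicio-3.py | create_asterisk_lines
-- ===== SOURCE A (Python) =====
-- def create_asterisk_lines(number):
--     counter = 0
--     asterisk_box = ""
--     while counter < number:
--         asterisk_box += f"""
--         {number * '*'}"""
--         counter += 1
--     return asterisk_box
-- ===== SOURCE B (Python) =====
-- def create_asterisk_lines(number):
--     return ("\n        " + number * '*') * number
-- ===== Notes on version B (the rewrite author's own statement) =====
-- stated objective: simpler
-- what changed: Replaces the while-loop string accumulator with a closed form: build the single row once and repeat it with string multiplication.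
import Mathlib
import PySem

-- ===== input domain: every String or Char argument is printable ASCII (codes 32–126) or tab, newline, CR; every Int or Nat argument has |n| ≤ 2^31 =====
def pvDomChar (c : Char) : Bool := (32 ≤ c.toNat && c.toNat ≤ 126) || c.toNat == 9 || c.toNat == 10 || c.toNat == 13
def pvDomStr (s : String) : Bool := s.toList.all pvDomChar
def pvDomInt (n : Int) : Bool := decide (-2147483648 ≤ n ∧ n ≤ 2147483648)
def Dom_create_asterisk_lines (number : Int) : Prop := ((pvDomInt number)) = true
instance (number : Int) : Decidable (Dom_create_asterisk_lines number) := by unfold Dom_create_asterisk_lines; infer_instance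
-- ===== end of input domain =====

-- B replaces A's while-loop accumulator with closed-form string repetition (objective: simpler).
-- ===== PORT A =====
-- Python string repetition number * '*' (empty for number <= 0)
def pyStars (number : Int) : String := String.mk (List.replicate number.toNat '*')

-- the while-loop: while counter < number: box += "\n        " + stars; counter += 1
def createLoop (number counter : Int) (box : String) : String :=
  if counter < number then
    createLoop number (counter + 1) (box ++ "\n        " ++ pyStars number)
  else box
termination_by (number - counter).toNat
decreasing_by omega

def create_asterisk_lines (number : Int) : String := createLoop number 0 ""

-- ===== PORT B =====
def create_asterisk_lines_alt (number : Int) : String :=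
  String.join (List.replicate number.toNat ("\n        " ++ pyStars number))

-- ===== PRECONDITION & SPEC =====
def Spec_create_asterisk_lines (number : Int) (out : String) : Prop := out = create_asterisk_lines_alt number
instance (number : Int) (out : String) : Decidable (Spec_create_asterisk_lines number out) := by unfold Spec_create_asterisk_lines; infer_instance

-- ===== CLAIM (what is proved, stated in full; the proofs are below) =====
def Claim_equal_create_asterisk_lines : Prop := ∀ (number : Int), Dom_create_asterisk_lines number → Spec_create_asterisk_lines number (create_asterisk_lines number)

-- ===== LEMMAS AND PROOFS =====

-- ===== VERDICT (by name: the statement is the Claim_ definition above) =====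
theorem foldl_append_str (l : List String) : ∀ (a : String),
    l.foldl (fun r s => r ++ s) a = a ++ l.foldl (fun r s => r ++ s) "" := by
  induction l with
  | nil => intro a; simp
  | cons x xs ih =>
    intro a
    simp only [List.foldl_cons]
    rw [ih (a ++ x), ih (("" : String) ++ x)]
    simp [String.append_assoc]

theorem createLoop_eq (number : Int) : ∀ (k : Nat) (counter : Int) (box : String),
    (number - counter).toNat = k →
    createLoop number counter box = box ++ String.join (List.replicate k ("\n        " ++ pyStars number)) := by
  intro k
  induction k with
  | zero =>
    intro counter box h
    rw [createLoop]
    have : ¬ counter < number := by omega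
    simp [this, String.join]
  | succ n ih =>
    intro counter box h
    rw [createLoop]
    have hlt : counter < number := by omega
    simp only [hlt, if_pos]
    rw [ih (counter + 1) _ (by omega)]
    simp only [String.join, List.replicate_succ, List.foldl_cons]
    rw [foldl_append_str _ (("" : String) ++ ("\n        " ++ pyStars number))]
    simp [String.append_assoc]

theorem create_asterisk_lines_spec : Claim_equal_create_asterisk_lines := by
  intro number _
  unfold Spec_create_asterisk_lines create_asterisk_lines create_asterisk_lines_alt
  rw [createLoop_eq number number.toNat 0 "" (by omega)]
  simp
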